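-- pv_equiv track=rewrite | github.com/nlutala/data-structures-and-algorithms-gg | dsa_problems/hashmap_or_dict/level1/remove_min_non_common_elems.py | no_common_elems
-- ===== SOURCE A (Python) =====
-- def no_common_elems(arr1: list[int], arr2: list[int]) -> int:
--     """
--     Given two arrays arr1[] and arr2[] consisting of n and m elements
--     respectively. The task is to find the minimum number of elements to remove
--     from each array such that intersection of both arrays becomes empty and
--     both arrays become mutually exclusive.\n
--
--     :param - arr1 (list of integers)\n
--     :param - arr2 (list of integers)\n
--
--     returns the minimum number of elements to remove from each array.
--     """
--     arr1_set = list(set(arr1))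
--     arr2_set = list(set(arr2))
--
--     num_to_remove = 0
--
--     for a in arr1_set:
--         if a in arr2:
--             num_to_remove += 1
--
--     return num_to_remove
-- ===== SOURCE B (Python) =====
-- def no_common_elems(arr1: list[int], arr2: list[int]) -> int:
--     # Sorted-merge: sort the deduplicated values of each list, then one
--     # linear two-pointer pass counting equal heads.
--     s1 = sorted(set(arr1))
--     s2 = sorted(set(arr2))
--     i = j = count = 0
--     while i < len(s1) and j < len(s2):
--         if s1[i] < s2[j]:
--             i += 1
--         elif s2[j] < s1[i]:
--             j += 1
--         else:
--             count += 1
--             i += 1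
--             j += 1
--     return count
-- ===== Notes on version B (the rewrite author's own statement) =====
-- stated objective: faster
-- what changed: Replaces A's per-distinct-element linear scan of arr2 with sorting the deduplicated values of both lists and counting matches in one two-pointer merge pass.
import Mathlib
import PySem

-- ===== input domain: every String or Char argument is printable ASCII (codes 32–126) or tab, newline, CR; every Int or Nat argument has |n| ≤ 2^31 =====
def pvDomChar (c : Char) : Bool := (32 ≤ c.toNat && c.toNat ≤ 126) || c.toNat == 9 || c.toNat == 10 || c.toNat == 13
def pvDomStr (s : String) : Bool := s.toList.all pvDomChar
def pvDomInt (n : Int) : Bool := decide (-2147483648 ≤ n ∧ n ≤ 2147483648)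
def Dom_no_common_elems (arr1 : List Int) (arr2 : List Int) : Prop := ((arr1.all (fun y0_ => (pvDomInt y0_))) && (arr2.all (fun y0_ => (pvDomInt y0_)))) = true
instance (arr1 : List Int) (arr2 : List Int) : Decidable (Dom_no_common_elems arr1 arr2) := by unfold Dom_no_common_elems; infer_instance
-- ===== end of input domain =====

-- B sorts the deduplicated values of both lists and counts matches in one two-pointer merge pass,
-- instead of A's linear scan of arr2 for each distinct element of arr1.

-- ===== PORT A =====
def no_common_elems (arr1 : List Int) (arr2 : List Int) : Int :=
  let arr1_set := PySem.Set.ofList arr1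
  let _arr2_set := PySem.Set.ofList arr2   -- computed by A, never used
  arr1_set.foldl (fun num_to_remove a => if a ∈ arr2 then num_to_remove + 1 else num_to_remove) 0

-- ===== PORT B =====
-- the while loop of Source B: two pointers over the sorted lists, carrying `count`
def noCommonMergeLoop : List Int → List Int → Int → Int
  | x :: xs, y :: ys, count =>
      if x < y then noCommonMergeLoop xs (y :: ys) count
      else if y < x then noCommonMergeLoop (x :: xs) ys count
      else noCommonMergeLoop xs ys (count + 1)
  | _, _, count => count
  termination_by s1 s2 _ => s1.length + s2.length

def no_common_elems_alt (arr1 : List Int) (arr2 : List Int) : Int :=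
  let s1 := PySem.List.sorted (PySem.Set.ofList arr1) (fun x => x) false
  let s2 := PySem.List.sorted (PySem.Set.ofList arr2) (fun x => x) false
  noCommonMergeLoop s1 s2 0

-- ===== PRECONDITION & SPEC =====
def Spec_no_common_elems (arr1 : List Int) (arr2 : List Int) (out : Int) : Prop := out = no_common_elems_alt arr1 arr2
instance (arr1 : List Int) (arr2 : List Int) (out : Int) : Decidable (Spec_no_common_elems arr1 arr2 out) := by unfold Spec_no_common_elems; infer_instance

-- ===== CLAIM (what is proved, stated in full; the proofs are below) =====
def Claim_equal_no_common_elems : Prop := ∀ (arr1 : List Int) (arr2 : List Int), Dom_no_common_elems arr1 arr2 → Spec_no_common_elems arr1 arr2 (no_common_elems arr1 arr2)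

-- ===== LEMMAS AND PROOFS =====

-- On strictly increasing lists the merge loop counts the elements of s1 that occur in s2.
theorem mem_cons_iff_of_lt {z y : Int} (ys : List Int) (hzy : y < z) :
    z ∈ y :: ys ↔ z ∈ ys := by
  constructor
  · intro h
    rcases List.mem_cons.mp h with rfl | h
    · omega
    · exact h
  · exact List.mem_cons_of_mem _

theorem noCommonMergeLoop_eq (s1 s2 : List Int) (c : Int)
    (h1 : s1.Pairwise (· < ·)) (h2 : s2.Pairwise (· < ·)) :
    noCommonMergeLoop s1 s2 c = c + (s1.countP (fun x => decide (x ∈ s2)) : Int) := by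
  fun_induction noCommonMergeLoop s1 s2 c with
  | case1 x xs y ys count hxy ih =>
      rw [ih h1.tail h2]
      have hx : x ∉ y :: ys := by
        intro hmem
        rcases List.mem_cons.mp hmem with rfl | hmem
        · omega
        · have := (List.pairwise_cons.mp h2).1 x hmem; omega
      simp [List.countP_cons]
      simpa using hx
  | case2 x xs y ys count hxy hyx ih =>
      rw [ih h1 h2.tail]
      have hcong : (x :: xs).countP (fun z => decide (z ∈ y :: ys))
          = (x :: xs).countP (fun z => decide (z ∈ ys)) := by
        apply List.countP_congr
        intro z hz
        have hzy : y < z := by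
          rcases List.mem_cons.mp hz with rfl | hz
          · omega
          · have := (List.pairwise_cons.mp h1).1 z hz; omega
        simp [mem_cons_iff_of_lt ys hzy]
      rw [hcong]
  | case3 x xs y ys count hxy hyx ih =>
      have hxy' : x = y := by omega
      rw [ih h1.tail h2.tail]
      have hx : x ∈ y :: ys := by simp [hxy']
      have hcong : xs.countP (fun z => decide (z ∈ y :: ys))
          = xs.countP (fun z => decide (z ∈ ys)) := by
        apply List.countP_congr
        intro z hz
        have hzy : y < z := by
          have := (List.pairwise_cons.mp h1).1 z hz; omega
        simp [mem_cons_iff_of_lt ys hzy]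
      rw [List.countP_cons, hcong]
      simp [hx]
      ring
  | case4 s1 s2 count h =>
      rcases s1 with _ | ⟨x, xs⟩
      · simp
      · rcases s2 with _ | ⟨y, ys⟩
        · simp
        · exact absurd rfl (fun hh => h x xs y ys hh rfl)
-- ===== VERDICT (by name: the statement is the Claim_ definition above) =====
theorem no_common_elems_spec : Claim_equal_no_common_elems := by
  intro arr1 arr2 _
  unfold Spec_no_common_elems no_common_elems no_common_elems_alt
  rw [noCommonMergeLoop_eq _ _ _ (PySem.List.sorted_ofList_pairwise_lt arr1)
        (PySem.List.sorted_ofList_pairwise_lt arr2)]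
  rw [PySem.List.foldl_ite_add_one]
  have hcong : (PySem.List.sorted (PySem.Set.ofList arr1) (fun x => x) false).countP
        (fun x => decide (x ∈ PySem.List.sorted (PySem.Set.ofList arr2) (fun x => x) false))
      = (PySem.List.sorted (PySem.Set.ofList arr1) (fun x => x) false).countP
        (fun x => decide (x ∈ arr2)) := by
    apply List.countP_congr
    intro z _
    simp [PySem.List.mem_sorted, PySem.Set.mem_ofList]
  rw [hcong, (PySem.List.sorted_perm (PySem.Set.ofList arr1) (fun x => x) false).countP_eq]
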